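-- pv_equiv track=rewrite | github.com/LambdaAK/Bool-Transformer | data/dataset.py | tokens_to_int_string
-- ===== SOURCE A (Python) =====
-- DIGITS = set("0123456789")
--
-- def tokens_to_int_string(tokens: list[str]) -> str:
--     """Group digit tokens into numbers for evaluation. Returns eval-able string."""
--     result = []
--     i = 0
--     while i < len(tokens):
--         t = tokens[i]
--         if t in "()" or t in "+-*" or t == "//":
--             result.append(t)
--             i += 1
--         elif t == "-" and i + 1 < len(tokens) and tokens[i + 1] in DIGITS:
--             num = "-"
--             i += 1
--             while i < len(tokens) and tokens[i] in DIGITS: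
--                 num += tokens[i]
--                 i += 1
--             result.append(num)
--         elif t in DIGITS:
--             num = ""
--             while i < len(tokens) and tokens[i] in DIGITS:
--                 num += tokens[i]
--                 i += 1
--             result.append(num)
--         else:
--             i += 1
--     return " ".join(result)
-- ===== SOURCE B (Python) =====
-- DIGITS = set("0123456789")
--
-- def tokens_to_int_string(tokens: list[str]) -> str:
--     """Single-pass fold with a digit buffer instead of an index-threaded while loop."""
--     parts = []
--     cur = ""
--     for t in tokens:
--         if t in DIGITS:
--             cur += t
--         else:
--             if cur:
--                 parts.append(cur)
--                 cur = ""
--             if t in "()" or t in "+-*" or t == "//":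
--                 parts.append(t)
--     if cur:
--         parts.append(cur)
--     return " ".join(parts)
-- ===== Notes on version B (the rewrite author's own statement) =====
-- stated objective: simpler
-- what changed: Replaced the index-threaded while loop with nested digit-collecting while loops by a single left fold over the tokens that buffers the current digit run and flushes it when a non-digit token (or the end) is reached.
import Mathlib
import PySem

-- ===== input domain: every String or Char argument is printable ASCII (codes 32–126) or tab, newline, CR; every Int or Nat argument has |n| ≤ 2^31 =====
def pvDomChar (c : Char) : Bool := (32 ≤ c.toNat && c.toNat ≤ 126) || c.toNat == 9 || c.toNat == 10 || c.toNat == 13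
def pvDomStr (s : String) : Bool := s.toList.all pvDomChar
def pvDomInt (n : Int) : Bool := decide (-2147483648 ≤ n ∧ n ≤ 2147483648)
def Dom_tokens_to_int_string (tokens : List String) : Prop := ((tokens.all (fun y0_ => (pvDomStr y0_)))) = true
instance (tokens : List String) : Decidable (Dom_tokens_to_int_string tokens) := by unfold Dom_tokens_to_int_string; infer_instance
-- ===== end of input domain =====

-- B replaces A's index-threaded while loop (with its inner digit-collecting while loops)
-- by a single left fold that buffers the current digit run; same return value (simpler, not faster).

-- ===== PORT A =====
-- DIGITS = set("0123456789")
def pvDIGITS : PySem.Set String :=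
  PySem.Set.ofList ["0", "1", "2", "3", "4", "5", "6", "7", "8", "9"]

-- the inner 'while i < len(tokens) and tokens[i] in DIGITS: num += tokens[i]; i += 1':
-- returns the collected number string and the remaining tokens (the new index position)
def pvTakeNumA : List String → String × List String
  | [] => ("", [])
  | t :: rest =>
    if PySem.Set.contains pvDIGITS t then
      let p := pvTakeNumA rest
      (t ++ p.1, p.2)
    else ("", t :: rest)

theorem pvTakeNumA_len : ∀ xs : List String, (pvTakeNumA xs).2.length ≤ xs.length := by
  intro xs
  induction xs with
  | nil => simp [pvTakeNumA]
  | cons t rest ih =>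
    simp only [pvTakeNumA]
    split
    · exact Nat.le_succ_of_le ih
    · simp

-- the outer while loop of A, building the result list; recursion on the remaining tokens
def pvLoopA : List String → List String
  | [] => []
  | t :: rest =>
    if PySem.Str.isIn t "()" || PySem.Str.isIn t "+-*" || t == "//" then
      t :: pvLoopA rest
    else if t == "-" && (match rest with | r :: _ => PySem.Set.contains pvDIGITS r | [] => false) then
      -- dead in Python too: "-" already matches 't in "+-*"' above; kept for faithfulness
      let p := pvTakeNumA rest
      ("-" ++ p.1) :: pvLoopA p.2
    else if PySem.Set.contains pvDIGITS t then
      let p := pvTakeNumA (t :: rest)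
      p.1 :: pvLoopA p.2
    else pvLoopA rest
  termination_by xs => xs.length
  decreasing_by
  · simp
  · simp only [List.length_cons]
    exact Nat.lt_succ_of_le (pvTakeNumA_len rest)
  · simp only [pvTakeNumA, *, if_pos, List.length_cons]
    exact Nat.lt_succ_of_le (pvTakeNumA_len rest)
  · simp

def tokens_to_int_string (tokens : List String) : String :=
  PySem.Str.join " " (pvLoopA tokens)

-- ===== PORT B =====
-- one step of B's for-loop: state = (parts so far, current digit buffer)
def pvStepB (st : List String × String) (t : String) : List String × String :=
  if PySem.Set.contains pvDIGITS t then (st.1, st.2 ++ t)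
  else
    let parts := if st.2 ≠ "" then st.1 ++ [st.2] else st.1
    if PySem.Str.isIn t "()" || PySem.Str.isIn t "+-*" || t == "//" then
      (parts ++ [t], "")
    else (parts, "")

-- the trailing 'if cur: parts.append(cur)'
def pvFlushB (st : List String × String) : List String :=
  if st.2 ≠ "" then st.1 ++ [st.2] else st.1

def tokens_to_int_string_alt (tokens : List String) : String :=
  PySem.Str.join " " (pvFlushB (tokens.foldl pvStepB ([], "")))

-- ===== PRECONDITION & SPEC =====
def Spec_tokens_to_int_string (tokens : List String) (out : String) : Prop := out = tokens_to_int_string_alt tokens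
instance (tokens : List String) (out : String) : Decidable (Spec_tokens_to_int_string tokens out) := by unfold Spec_tokens_to_int_string; infer_instance

-- ===== CLAIM (what is proved, stated in full; the proofs are below) =====
def Claim_equal_tokens_to_int_string : Prop := ∀ (tokens : List String), Dom_tokens_to_int_string tokens → Spec_tokens_to_int_string tokens (tokens_to_int_string tokens)

-- ===== LEMMAS AND PROOFS =====

-- facts about digit tokens (members of pvDIGITS)
theorem pvDigit_facts (t : String) (h : PySem.Set.contains pvDIGITS t = true) :
    (PySem.Str.isIn t "()" || PySem.Str.isIn t "+-*" || t == "//") = false ∧ (t == "-") = false ∧ t ≠ "" := by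
  have hm : t ∈ ["0", "1", "2", "3", "4", "5", "6", "7", "8", "9"] := by
    have := (PySem.Set.contains_iff (s := pvDIGITS) (x := t)).mp h
    simpa [pvDIGITS, PySem.Set.mem_ofList] using this
  fin_cases hm <;> refine ⟨by decide, by decide, by decide⟩

theorem pvAppend_ne_empty (c t : String) (hc : c ≠ "") : c ++ t ≠ "" := by
  intro h
  apply hc
  have h2 : c.toList ++ t.toList = [] := by
    rw [← String.toList_append, h]; rfl
  have : c.toList = [] := by
    cases hcl : c.toList <;> simp [hcl] at h2 ⊢
  exact String.toList_inj.mp (by simp [this])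

-- unfolding lemmas for pvTakeNumA
theorem pvTakeNumA_digit (t : String) (rest : List String)
    (hd : PySem.Set.contains pvDIGITS t = true) :
    pvTakeNumA (t :: rest) = (t ++ (pvTakeNumA rest).1, (pvTakeNumA rest).2) := by
  simp only [pvTakeNumA, hd, if_true]

theorem pvTakeNumA_nondigit (t : String) (rest : List String)
    (hd : PySem.Set.contains pvDIGITS t = false) :
    pvTakeNumA (t :: rest) = ("", t :: rest) := by
  simp only [pvTakeNumA, hd, Bool.false_eq_true, if_false]

-- branch lemmas for A's outer loop
theorem pvLoopA_nil : pvLoopA [] = [] := by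
  rw [pvLoopA.eq_def]

theorem pvLoopA_op (t : String) (rest : List String)
    (hop : (PySem.Str.isIn t "()" || PySem.Str.isIn t "+-*" || t == "//") = true) :
    pvLoopA (t :: rest) = t :: pvLoopA rest := by
  rw [pvLoopA.eq_def]
  simp only [hop, if_true]

theorem pvLoopA_digit (t : String) (rest : List String)
    (hd : PySem.Set.contains pvDIGITS t = true) :
    pvLoopA (t :: rest) = (t ++ (pvTakeNumA rest).1) :: pvLoopA (pvTakeNumA rest).2 := by
  obtain ⟨hop, hm, _⟩ := pvDigit_facts t hd
  rw [pvLoopA.eq_def]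
  simp only [hop, hm, hd, Bool.false_eq_true, if_false, Bool.false_and, if_true,
    pvTakeNumA_digit t rest hd]

theorem pvLoopA_skip (t : String) (rest : List String)
    (hd : PySem.Set.contains pvDIGITS t = false)
    (hop : (PySem.Str.isIn t "()" || PySem.Str.isIn t "+-*" || t == "//") = false) :
    pvLoopA (t :: rest) = pvLoopA rest := by
  have hm : (t == "-") = false := by
    by_cases h : t = "-"
    · subst h; exact absurd hop (by decide)
    · simpa using h
  rw [pvLoopA.eq_def]
  simp only [hop, hm, hd, Bool.false_eq_true, if_false, Bool.false_and]

-- branch lemmas for B's fold step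
theorem pvStepB_digit (st : List String × String) (t : String)
    (hd : PySem.Set.contains pvDIGITS t = true) :
    pvStepB st t = (st.1, st.2 ++ t) := by
  simp only [pvStepB, hd, if_true]

theorem pvStepB_op (st : List String × String) (t : String)
    (hd : PySem.Set.contains pvDIGITS t = false)
    (hop : (PySem.Str.isIn t "()" || PySem.Str.isIn t "+-*" || t == "//") = true) :
    pvStepB st t = ((if st.2 ≠ "" then st.1 ++ [st.2] else st.1) ++ [t], "") := by
  simp only [pvStepB, hd, Bool.false_eq_true, if_false, hop, if_true]

theorem pvStepB_other (st : List String × String) (t : String)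
    (hd : PySem.Set.contains pvDIGITS t = false)
    (hop : (PySem.Str.isIn t "()" || PySem.Str.isIn t "+-*" || t == "//") = false) :
    pvStepB st t = ((if st.2 ≠ "" then st.1 ++ [st.2] else st.1), "") := by
  simp only [pvStepB, hd, hop, Bool.false_eq_true, if_false]

-- the loop invariant: folding B's step from state (parts, cur) produces, after the final
-- flush, parts followed by what A's loop produces on the remaining tokens (with cur, when
-- nonempty, continuing the current digit run)
theorem pvInvariant : ∀ (xs : List String) (parts : List String) (cur : String),
    pvFlushB (xs.foldl pvStepB (parts, cur)) =
      if cur = "" then parts ++ pvLoopA xs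
      else parts ++ (cur ++ (pvTakeNumA xs).1) :: pvLoopA (pvTakeNumA xs).2 := by
  intro xs
  induction xs with
  | nil =>
    intro parts cur
    by_cases hc : cur = "" <;>
      simp [pvFlushB, pvLoopA_nil, pvTakeNumA, hc, String.append_empty]
  | cons t rest ih =>
    intro parts cur
    cases hd : PySem.Set.contains pvDIGITS t with
    | true =>
      obtain ⟨hop, hm, hne⟩ := pvDigit_facts t hd
      rw [List.foldl_cons, pvStepB_digit _ _ hd]
      by_cases hc : cur = ""
      · subst hc
        rw [show ("" : String) ++ t = t from String.empty_append (s := t), ih parts t,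
          if_neg hne, if_pos rfl, pvLoopA_digit t rest hd]
      · rw [ih parts (cur ++ t), if_neg (pvAppend_ne_empty cur t hc), if_neg hc,
          pvTakeNumA_digit t rest hd, String.append_assoc]
    | false =>
      cases hop : (PySem.Str.isIn t "()" || PySem.Str.isIn t "+-*" || t == "//") with
      | true =>
        rw [List.foldl_cons, pvStepB_op _ _ hd hop]
        by_cases hc : cur = ""
        · subst hc
          rw [if_neg (by simp), ih (parts ++ [t]) "", if_pos rfl, if_pos rfl,
            pvLoopA_op t rest hop]
          simp
        · rw [if_pos hc, ih (parts ++ [cur] ++ [t]) "", if_pos rfl, if_neg hc,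
            pvTakeNumA_nondigit t rest hd, pvLoopA_op t rest hop]
          simp [String.append_empty]
      | false =>
        rw [List.foldl_cons, pvStepB_other _ _ hd hop]
        by_cases hc : cur = ""
        · subst hc
          rw [if_neg (by simp), ih parts "", if_pos rfl, if_pos rfl,
            pvLoopA_skip t rest hd hop]
        · rw [if_pos hc, ih (parts ++ [cur]) "", if_pos rfl, if_neg hc,
            pvTakeNumA_nondigit t rest hd, pvLoopA_skip t rest hd hop]
          simp [String.append_empty]

-- ===== VERDICT (by name: the statement is the Claim_ definition above) =====
theorem tokens_to_int_string_spec : Claim_equal_tokens_to_int_string := by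
  intro tokens _
  unfold Spec_tokens_to_int_string tokens_to_int_string tokens_to_int_string_alt
  rw [pvInvariant tokens [] ""]
  simp
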